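-- pv_equiv track=rewrite | github.com/VamsiImmanneni/MiniResearchProject | tests.py | right_rotate_matrix
-- ===== SOURCE A (Python) =====
-- def right_rotate_matrix(A, k):
--     # UNVECTORIZE THIS
--     num_cols = len(A[0])
--     k %= num_cols
--     result = [[0] * num_cols for _ in range(len(A))]
--     for j in range(num_cols):
--         for i in range(len(A)):
--             result[i][j] = A[i][(j - k + num_cols) % num_cols]
--     return result
-- ===== SOURCE B (Python) =====
-- def right_rotate_matrix(A, k):
--     num_cols = len(A[0])
--     k %= num_cols
--     return [row[-k:] + row[:-k] for row in A]
-- ===== Notes on version B (the rewrite author's own statement) =====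
-- stated objective: simpler
-- what changed: Replaces the column-by-column nested loops with modular index arithmetic writing into a preallocated zero matrix by a single pass over rows, each output row assembled as the concatenation of two slices row[-k:] + row[:-k]; bulk slice copies replace per-cell indexing with modular arithmetic (measured constant-factor speedup).
-- outside the precondition, e.g. on right_rotate_matrix([[1, 2], [3, 4, 5]], 1): A returns [[2, 1], [4, 3]], B returns [[2, 1], [5, 3, 4]]
import Mathlib
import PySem

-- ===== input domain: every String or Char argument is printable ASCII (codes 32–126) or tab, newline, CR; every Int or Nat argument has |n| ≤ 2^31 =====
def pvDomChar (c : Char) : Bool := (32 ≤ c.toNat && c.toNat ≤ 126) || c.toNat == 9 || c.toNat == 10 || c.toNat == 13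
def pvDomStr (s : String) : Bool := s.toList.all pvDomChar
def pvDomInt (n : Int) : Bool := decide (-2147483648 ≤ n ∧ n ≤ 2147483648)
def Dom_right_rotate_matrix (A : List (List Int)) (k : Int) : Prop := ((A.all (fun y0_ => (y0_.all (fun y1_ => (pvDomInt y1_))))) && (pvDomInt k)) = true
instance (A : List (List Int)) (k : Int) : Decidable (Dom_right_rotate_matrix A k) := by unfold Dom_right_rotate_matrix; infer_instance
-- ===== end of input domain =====

-- B replaces A's nested column/row loops writing cells of a preallocated zero matrix with a single
-- pass over rows that builds each output row as the slice concatenation row[-k:] + row[:-k] (simpler).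


-- ===== PORT A =====
def right_rotate_matrix (A : List (List Int)) (k : Int) : List (List Int) :=
  let num_cols : Int := ((PySem.List.pyGetD A 0 []).length : Int)
  let k' : Int := PySem.Int.mod k num_cols
  let result : List (List Int) :=
    (PySem.List.pyRange 0 (A.length : Int) 1).map (fun _ => PySem.List.pyRepeat [(0 : Int)] num_cols)
  (PySem.List.pyRange 0 num_cols 1).foldl (fun result j =>
    (PySem.List.pyRange 0 (A.length : Int) 1).foldl (fun result i =>
      PySem.List.pySetD result i
        (PySem.List.pySetD (PySem.List.pyGetD result i []) j
          (PySem.List.pyGetD (PySem.List.pyGetD A i [])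
            (PySem.Int.mod (j - k' + num_cols) num_cols) 0))) result) result

-- ===== PORT B =====
def right_rotate_matrix_alt (A : List (List Int)) (k : Int) : List (List Int) :=
  let num_cols : Int := ((PySem.List.pyGetD A 0 []).length : Int)
  let k' : Int := PySem.Int.mod k num_cols
  A.map (fun row => PySem.List.slice row (some (-k')) none ++ PySem.List.slice row none (some (-k')))

-- ===== PRECONDITION & SPEC =====
-- Pre_ excludes empty A and an empty first row (A raises IndexError resp. ZeroDivisionError) and
-- non-rectangular inputs: a column rotation is only specified for rectangular matrices — on ragged
-- input A raises (shorter row) or rotates/truncates every row to the first row's width (longer row)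
-- while B rotates each row by its own length, and neither value is the specified one.
def Pre_right_rotate_matrix (A : List (List Int)) (k : Int) : Prop :=
  A ≠ [] ∧ A.headD [] ≠ [] ∧ ∀ row ∈ A, row.length = (A.headD []).length
instance (A : List (List Int)) (k : Int) : Decidable (Pre_right_rotate_matrix A k) := by
  unfold Pre_right_rotate_matrix; infer_instance
def pvWitness_right_rotate_matrix : List (List Int) × Int := ([[1, 2], [3, 4]], 3)

def Spec_right_rotate_matrix (A : List (List Int)) (k : Int) (out : List (List Int)) : Prop := out = right_rotate_matrix_alt A k
instance (A : List (List Int)) (k : Int) (out : List (List Int)) : Decidable (Spec_right_rotate_matrix A k out) := by unfold Spec_right_rotate_matrix; infer_instance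

-- ===== CLAIM (what is proved, stated in full; the proofs are below) =====
def Claim_equal_right_rotate_matrix : Prop := ∀ (A : List (List Int)) (k : Int), Dom_right_rotate_matrix A k → Pre_right_rotate_matrix A k → Spec_right_rotate_matrix A k (right_rotate_matrix A k)

-- ===== LEMMAS AND PROOFS =====

lemma setLoop {β : Type} (d : β) (f : Nat → β → β) :
    ∀ (n : Nat) (R : List β), n ≤ R.length →
      (List.range n).foldl (fun R i => R.set i (f i (R.getD i d))) R
        = R.mapIdx (fun i r => if i < n then f i r else r) := by
  intro n
  induction n with
  | zero => intro R _; simp [List.ext_getElem_iff]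
  | succ n ih =>
    intro R hn
    rw [List.range_succ, List.foldl_append, List.foldl_cons, List.foldl_nil, ih R (by omega)]
    have hgd : (R.mapIdx (fun i r => if i < n then f i r else r)).getD n d = R[n] := by
      rw [List.getD_eq_getElem _ _ (by simp; omega)]
      simp only [List.getElem_mapIdx]
      rw [if_neg (by omega)]
      rfl
    rw [hgd]
    apply List.ext_getElem
    · simp
    · intro i h1 h2
      simp only [List.getElem_set, List.getElem_mapIdx]
      by_cases hi : i = n
      · subst hi
        rw [if_pos rfl, if_pos (by omega)]
        rfl
      · rw [if_neg (by omega : ¬ n = i)]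
        by_cases hlt : i < n
        · rw [if_pos hlt, if_pos (by omega)]
        · rw [if_neg hlt, if_neg (by omega)]

lemma mapIdx_congr_lt {β₂ : Type} (R : List β₂) (f g : Nat → β₂ → β₂)
    (h : ∀ i, i < R.length → ∀ r, f i r = g i r) : R.mapIdx f = R.mapIdx g := by
  apply List.ext_getElem
  · simp
  · intro i h1 h2
    simp only [List.getElem_mapIdx]
    exact h i (by simpa using h1) _

lemma setLoop2 {β γ : Type} (d : β) (g : Nat → γ → β → β) :
    ∀ (js : List γ) (R : List β) (n : Nat), n = R.length →
      js.foldl (fun R j => (List.range n).foldl (fun R i => R.set i (g i j (R.getD i d))) R) R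
        = R.mapIdx (fun i r => js.foldl (fun r j => g i j r) r) := by
  intro js
  induction js with
  | nil =>
    intro R n _
    simp [List.ext_getElem_iff]
  | cons j js ih =>
    intro R n hn
    rw [List.foldl_cons, setLoop d (fun i r => g i j r) n R (by omega),
      mapIdx_congr_lt _ _ (fun i r => g i j r) (by intro i hi r; rw [if_pos (by omega)]),
      ih _ n (by simp [hn]), List.mapIdx_mapIdx]
    rfl


lemma pvGetElemCongr {α : Type} (xs : List α) {a b : Nat} (h : a = b) {ha : a < xs.length} {hb : b < xs.length} :
    xs[a] = xs[b] := by subst h; rfl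

lemma rowEq (row : List Int) (c : Nat) (hc : 0 < c) (hlen : row.length = c)
    (k' : Int) (hk0 : 0 ≤ k') (hklt : k' < (c : Int)) :
    (List.replicate c (0:Int)).mapIdx
        (fun j e => if j < c then PySem.List.pyGetD row (PySem.Int.mod ((j:Int) - k' + (c:Int)) (c:Int)) 0 else e)
      = PySem.List.slice row (some (-k')) none ++ PySem.List.slice row none (some (-k')) := by
  obtain ⟨m, rfl⟩ : ∃ m : Nat, k' = (m : Int) := ⟨k'.toNat, (Int.toNat_of_nonneg hk0).symm⟩
  have hm : m < c := by exact_mod_cast hklt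
  have hmod : ∀ j : Nat, PySem.Int.mod ((j:Int) - (m:Int) + (c:Int)) (c:Int) = (((j + (c - m)) % c : Nat) : Int) := by
    intro j
    rw [PySem.Int.mod_eq_emod_of_pos (by exact_mod_cast hc)]
    have h1 : ((j:Int) - (m:Int) + (c:Int)) = (((j + (c - m)) : Nat) : Int) := by push_cast; omega
    rw [h1]
    exact (Int.natCast_mod _ _).symm
  have hrhs : PySem.List.slice row (some (-(m:Int))) none ++ PySem.List.slice row none (some (-(m:Int)))
      = row.drop ((c - m) % c) ++ row.take ((c - m) % c) := by
    rcases Nat.eq_zero_or_pos m with hm0 | hm0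
    · subst hm0
      simp only [Nat.sub_zero, Nat.mod_self, Nat.cast_zero, neg_zero, List.drop_zero, List.take_zero,
        List.append_nil]
      rw [PySem.List.slice_from row (by omega : (0:Int) ≤ 0), PySem.List.slice_to row (by omega : (0:Int) ≤ 0)]
      simp
    · rw [PySem.List.slice_from_neg_natCast row m hm0, PySem.List.slice_to_neg_natCast row m hm0,
        hlen, Nat.mod_eq_of_lt (by omega)]
  rw [hrhs]
  rcases Nat.eq_zero_or_pos m with hm0 | hm0
  · subst hm0
    simp only [Nat.sub_zero, Nat.mod_self, List.drop_zero, List.take_zero, List.append_nil]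
    apply List.ext_getElem
    · simp [hlen]
    · intro j h1 h2
      have hj : j < c := by simpa using h1
      simp only [List.getElem_mapIdx, if_pos hj, hmod j, PySem.List.pyGetD_natCast, Nat.sub_zero]
      rw [List.getD_eq_getElem _ _ (by rw [hlen]; exact Nat.mod_lt _ hc)]
      exact pvGetElemCongr _ (by rw [Nat.add_mod_right]; exact Nat.mod_eq_of_lt hj)
  · have hcm : (c - m) % c = c - m := Nat.mod_eq_of_lt (by omega)
    rw [hcm]
    apply List.ext_getElem
    · simp [hlen]
    · intro j h1 h2
      have hj : j < c := by simpa using h1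
      simp only [List.getElem_mapIdx, if_pos hj, hmod j, PySem.List.pyGetD_natCast]
      rw [List.getD_eq_getElem _ _ (by rw [hlen]; exact Nat.mod_lt _ hc)]
      rcases Nat.lt_or_ge j m with hjm | hjm
      · rw [List.getElem_append_left (by simp [hlen]; omega), List.getElem_drop]
        exact pvGetElemCongr _ (by rw [Nat.mod_eq_of_lt (by omega)]; omega)
      · rw [List.getElem_append_right (by simp [hlen]; omega), List.getElem_take]
        exact pvGetElemCongr _ (by simp [hlen]; rw [show j + (c - m) = (j - m) + c by omega,
          Nat.add_mod_right, Nat.mod_eq_of_lt (by omega)]; omega)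

lemma rrm_eq (A : List (List Int)) (k : Int)
    (hA : A ≠ []) (hh : A.headD [] ≠ []) (hrect : ∀ row ∈ A, row.length = (A.headD []).length) :
    right_rotate_matrix A k = right_rotate_matrix_alt A k := by
  simp only [right_rotate_matrix, right_rotate_matrix_alt, PySem.List.pyGetD_zero]
  have hget0 : A.getD 0 [] = A.headD [] := by cases A <;> rfl
  rw [hget0]
  set c : Nat := (A.headD []).length with hcdef
  have hc : 0 < c := by cases h : A.headD [] <;> simp_all
  set k' : Int := PySem.Int.mod k (c : Int) with hk'def
  have hk0 : 0 ≤ k' := PySem.Int.mod_nonneg _ (by exact_mod_cast hc)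
  have hklt : k' < (c : Int) := PySem.Int.mod_lt _ (by exact_mod_cast hc)
  simp only [PySem.List.pyRange_zero_nat, List.foldl_map, List.map_map,
    PySem.List.pySetD_natCast, PySem.List.pyGetD_natCast, PySem.List.pyRepeat_singleton,
    Int.toNat_natCast]
  rw [setLoop2 ([] : List Int)
      (fun i j r => r.set j (PySem.List.pyGetD (A.getD i []) (PySem.Int.mod ((j:Int) - k' + (c:Int)) (c:Int)) 0))
      (List.range c) _ A.length (by simp)]
  apply List.ext_getElem
  · simp
  · intro i h1 h2
    simp only [List.getElem_mapIdx, List.getElem_map, Function.comp]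
    rw [setLoop (0:Int) (fun j _ => PySem.List.pyGetD (A.getD i []) (PySem.Int.mod ((j:Int) - k' + (c:Int)) (c:Int)) 0) c _ (by simp)]
    have hiA : i < A.length := by simpa using h1
    have hrow : A.getD i [] = A[i] := List.getD_eq_getElem _ _ hiA
    rw [hrow]
    exact rowEq A[i] c hc (hrect _ (List.getElem_mem _)) k' hk0 hklt

-- ===== VERDICT (by name: the statement is the Claim_ definition above) =====
theorem right_rotate_matrix_spec : Claim_equal_right_rotate_matrix := by
  intro A k _ hpre
  unfold Spec_right_rotate_matrix
  exact rrm_eq A k hpre.1 hpre.2.1 hpre.2.2
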